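-- pv_equiv track=rewrite | github.com/lorenzocastillo/Algos-and-DS | python_problems/DivingBoard.py | diving_boards_better
-- ===== SOURCE A (Python) =====
-- def diving_boards_better(k, short_length, long_length):
--     res = set()
--     res.add(0)
--
--     board_lengths = (short_length, long_length)
--
--     def append_all(arr):
--         result = set()
--         for a in arr:
--             for b in board_lengths:
--                 result.add(a + b)
--         return result
--
--     for i in range(k):
--         res = append_all(res)
--
--     return res
-- ===== SOURCE B (Python) =====
-- def diving_boards_better(k, short_length, long_length):
--     # closed form: choosing j long boards among k gives length short*(k-j) + long*j
--     return {short_length * (k - j) + long_length * j for j in range(k + 1)}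
-- ===== Notes on version B (the rewrite author's own statement) =====
-- stated objective: faster
-- what changed: replaces the k-fold set-expansion loop (rebuilding the whole set each round, O(k^2) set insertions) by the closed-form set comprehension {short*(k-j)+long*j for j in range(k+1)}, one pass of k+1 insertions
-- outside the precondition, e.g. on diving_boards_better(-1, 2, 3): A returns {0}, B returns set()
import Mathlib
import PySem

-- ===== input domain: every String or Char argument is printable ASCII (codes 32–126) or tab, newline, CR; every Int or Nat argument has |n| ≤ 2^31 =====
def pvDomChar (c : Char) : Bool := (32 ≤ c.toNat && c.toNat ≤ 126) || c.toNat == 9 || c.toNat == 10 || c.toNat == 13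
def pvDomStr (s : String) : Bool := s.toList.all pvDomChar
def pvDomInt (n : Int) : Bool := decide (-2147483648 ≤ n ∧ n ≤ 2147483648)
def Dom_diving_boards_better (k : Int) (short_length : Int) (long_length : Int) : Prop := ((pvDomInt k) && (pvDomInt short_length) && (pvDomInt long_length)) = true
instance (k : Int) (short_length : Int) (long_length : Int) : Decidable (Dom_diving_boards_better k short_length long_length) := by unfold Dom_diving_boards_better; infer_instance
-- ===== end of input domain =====

-- B replaces A's k-fold set-expansion loop by the closed-form one-pass comprehension
-- {short*(k-j)+long*j | 0 ≤ j ≤ k} (objective: faster, O(k) insertions instead of O(k^2)).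

-- ===== PORT A =====
-- append_all: result = set(); for a in arr: for b in (short, long): result.add(a + b)
def divingAppendAll (short_length : Int) (long_length : Int) (arr : List Int) : List Int :=
  arr.foldl
    (fun result a => [short_length, long_length].foldl (fun r b => PySem.Set.add r (a + b)) result)
    PySem.Set.empty

def diving_boards_better (k : Int) (short_length : Int) (long_length : Int) : List Int :=
  (PySem.List.pyRange 0 k 1).foldl
    (fun res _ => divingAppendAll short_length long_length res)
    (PySem.Set.add PySem.Set.empty 0)

-- ===== PORT B =====
def diving_boards_better_alt (k : Int) (short_length : Int) (long_length : Int) : List Int :=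
  PySem.Set.ofList
    ((PySem.List.pyRange 0 (k + 1) 1).map
      (fun j => short_length * (k - j) + long_length * j))

-- ===== PRECONDITION & SPEC =====
-- Pre_ excludes negative k, a meaningless board count: there A's {0} and B's empty set are
-- equally accidental artefacts of range() being empty, a corner nobody would specify.
def Pre_diving_boards_better (k : Int) (short_length : Int) (long_length : Int) : Prop := 0 ≤ k
instance (k : Int) (short_length : Int) (long_length : Int) : Decidable (Pre_diving_boards_better k short_length long_length) := by unfold Pre_diving_boards_better; infer_instance

def pvWitness_diving_boards_better : Int × Int × Int := (3, 1, 5)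

def Spec_diving_boards_better (k : Int) (short_length : Int) (long_length : Int) (out : List Int) : Prop := out = diving_boards_better_alt k short_length long_length
instance (k : Int) (short_length : Int) (long_length : Int) (out : List Int) : Decidable (Spec_diving_boards_better k short_length long_length out) := by unfold Spec_diving_boards_better; infer_instance

-- ===== CLAIM (what is proved, stated in full; the proofs are below) =====
def Claim_equal_diving_boards_better : Prop := ∀ (k : Int) (short_length : Int) (long_length : Int), Dom_diving_boards_better k short_length long_length → Pre_diving_boards_better k short_length long_length → Spec_diving_boards_better k short_length long_length (diving_boards_better k short_length long_length)

-- ===== LEMMAS AND PROOFS =====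

-- arithmetic progression a, a+d, ..., a+d*(m-1) (first-insertion order of both programs)
def divingAP (a d : Int) (m : Nat) : List Int := (List.range m).map (fun j : Nat => a + d * (j : Int))

theorem divingAP_succ (a d : Int) (m : Nat) :
    divingAP a d (m + 1) = divingAP a d m ++ [a + d * m] := by
  simp [divingAP, List.range_succ]

theorem mem_divingAP {x a d : Int} {m : Nat} :
    x ∈ divingAP a d m ↔ ∃ j : Nat, j < m ∧ a + d * j = x := by
  simp [divingAP]

theorem not_mem_divingAP_top {a d : Int} (hd : d ≠ 0) (m : Nat) :
    a + d * m ∉ divingAP a d m := by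
  intro h
  obtain ⟨j, hj, he⟩ := mem_divingAP.mp h
  have : (j : Int) = (m : Int) := mul_left_cancel₀ hd (by linarith)
  omega

theorem nodup_divingAP {d : Int} (hd : d ≠ 0) (a : Int) (m : Nat) :
    (divingAP a d m).Nodup := by
  refine List.Nodup.map ?_ List.nodup_range
  intro j₁ j₂ he
  have : (j₁ : Int) = (j₂ : Int) := mul_left_cancel₀ hd (by linarith)
  omega

theorem divingStep_ap (s d a : Int) (hd : d ≠ 0) (m : Nat) :
    divingAppendAll s (s + d) (divingAP a d (m + 1)) = divingAP (a + s) d (m + 2) := by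
  induction m with
  | zero =>
      have h1 : a + s ∉ (PySem.Set.empty : List Int) := by simp [PySem.Set.empty]
      have h2 : a + (s + d) ∉ ([a + s] : List Int) := by
        simp; intro h; exact hd (by linarith)
      show divingAppendAll s (s + d) (divingAP a d 1) = divingAP (a + s) d 2
      rw [show divingAP a d 1 = [a] by simp [divingAP]]
      rw [show divingAP (a + s) d 2 = [a + s, a + s + d] by
        simp [divingAP, List.range_succ]]
      simp only [divingAppendAll, List.foldl]
      rw [PySem.Set.add_of_not_mem h1,
        show (PySem.Set.empty : List Int) ++ [a + s] = [a + s] from rfl,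
        PySem.Set.add_of_not_mem h2]
      simp [add_assoc]
  | succ m ih =>
      rw [divingAP_succ a d (m + 1)]
      unfold divingAppendAll at ih ⊢
      rw [List.foldl_append, ih]
      simp only [List.foldl]
      have he : a + d * ((m + 1 : Nat) : Int) + s = (a + s) + d * ((m + 1 : Nat) : Int) := by
        push_cast; ring
      have he2 : a + d * ((m + 1 : Nat) : Int) + (s + d) = (a + s) + d * ((m + 2 : Nat) : Int) := by
        push_cast; ring
      have hm1 : (a + s) + d * ((m + 1 : Nat) : Int) ∈ divingAP (a + s) d (m + 2) :=
        mem_divingAP.mpr ⟨m + 1, by omega, rfl⟩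
      have hm2 : (a + s) + d * ((m + 2 : Nat) : Int) ∉ divingAP (a + s) d (m + 2) :=
        not_mem_divingAP_top hd (m + 2)
      rw [he, PySem.Set.add_of_mem hm1, he2, PySem.Set.add_of_not_mem hm2, ← divingAP_succ]

theorem divingA_ap (s d : Int) (hd : d ≠ 0) (n : Nat) :
    (List.range n).foldl (fun res _ => divingAppendAll s (s + d) res)
      (PySem.Set.add PySem.Set.empty 0) = divingAP (s * n) d (n + 1) := by
  induction n with
  | zero =>
      simp [divingAP, List.range_succ, PySem.Set.add, PySem.Set.empty]
  | succ n ih =>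
      rw [List.range_succ, List.foldl_append, ih]
      simp only [List.foldl]
      rw [divingStep_ap s d (s * n) hd n]
      have : s * ((n + 1 : Nat) : Int) = s * (n : Int) + s := by push_cast; ring
      rw [this]

theorem divingA_const (s : Int) (n : Nat) :
    (List.range n).foldl (fun res _ => divingAppendAll s s res)
      (PySem.Set.add PySem.Set.empty 0) = [s * n] := by
  induction n with
  | zero => simp [PySem.Set.add, PySem.Set.empty]
  | succ n ih =>
      rw [List.range_succ, List.foldl_append, ih]
      simp only [List.foldl, divingAppendAll]
      rw [PySem.Set.add_of_not_mem (by simp [PySem.Set.empty] : s * (n:Int) + s ∉ (PySem.Set.empty : List Int))]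
      rw [PySem.Set.add_of_mem (by simp : s * (n:Int) + s ∈ (PySem.Set.empty : List Int) ++ [s * (n:Int) + s])]
      simp [PySem.Set.empty]; push_cast; ring

theorem diving_ofList_const (c : Int) (m : Nat) :
    PySem.Set.ofList (List.map (fun _ : Nat => c) (List.range (m + 1))) = [c] := by
  induction m with
  | zero => rfl
  | succ m ih =>
      rw [List.range_succ, List.map_append,
        show List.map (fun _ : Nat => c) [m + 1] = [c] from rfl,
        PySem.Set.ofList_append_singleton, ih]
      exact PySem.Set.add_of_mem (by simp)

theorem divingA_pyRange (k s l : Int) (hk : 0 ≤ k) :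
    diving_boards_better k s l =
      (List.range k.toNat).foldl (fun res _ => divingAppendAll s l res)
        (PySem.Set.add PySem.Set.empty 0) := by
  unfold diving_boards_better
  rw [PySem.List.pyRange_one, List.foldl_map]
  norm_num

theorem divingB_eq_map (k s l : Int) (hk : 0 ≤ k) :
    diving_boards_better_alt k s l =
      PySem.Set.ofList ((List.range (k.toNat + 1)).map
        (fun j : Nat => s * (k - (j : Int)) + l * (j : Int))) := by
  unfold diving_boards_better_alt
  rw [PySem.List.pyRange_one, List.map_map]
  rw [show (k + 1 - 0).toNat = k.toNat + 1 by omega]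
  congr 1
  apply List.map_congr_left
  intro j _
  simp

-- ===== VERDICT (by name: the statement is the Claim_ definition above) =====
theorem diving_boards_better_spec : Claim_equal_diving_boards_better := by
  intro k s l _ hk
  unfold Spec_diving_boards_better
  have hk' : (0:Int) ≤ k := hk
  have hkn : ((k.toNat : Int)) = k := Int.toNat_of_nonneg hk'
  by_cases hd : l = s
  · subst hd
    rw [divingA_pyRange k l l hk', divingA_const, divingB_eq_map k l l hk']
    rw [show (List.range (k.toNat + 1)).map (fun j : Nat => l * (k - (j : Int)) + l * (j : Int))
         = (List.range (k.toNat + 1)).map (fun _ : Nat => l * k) from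
      List.map_congr_left (fun j _ => by ring)]
    rw [diving_ofList_const, hkn]
  · have hne : l - s ≠ 0 := fun h => hd (by linarith)
    rw [divingA_pyRange k s l hk', divingB_eq_map k s l hk']
    rw [show l = s + (l - s) by ring, divingA_ap s (l - s) hne k.toNat]
    have hmap : (List.range (k.toNat + 1)).map
          (fun j : Nat => s * (k - (j : Int)) + (s + (l - s)) * (j : Int))
         = divingAP (s * k.toNat) (l - s) (k.toNat + 1) := by
      unfold divingAP
      exact List.map_congr_left (fun j _ => by rw [hkn]; ring)
    rw [hmap]
    exact (PySem.Set.ofList_eq_self_of_nodup _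
      (nodup_divingAP hne (s * k.toNat) (k.toNat + 1))).symm
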